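-- pv_equiv track=rewrite | github.com/manaswini1869/dsa101 | dailyLeetcode/Divide Array Into Increasing Sequences.py | canDivideIntoSubsequences
-- ===== SOURCE A (Python) =====
-- from typing import List
--
-- def canDivideIntoSubsequences(nums: List[int], k: int) -> bool:
--     n = len(nums)
--     if n < k:
--         return False
--
--     freq_map = {}
--     max_freq = float("-inf")
--     for num in nums:
--         freq_map[num] = freq_map.get(num, 0) + 1
--         if max_freq < freq_map[num]:
--             max_freq = freq_map[num]
--         if max_freq * k > n:
--             return False
--
--     return max_freq * k <= n
-- ===== SOURCE B (Python) =====
-- from typing import List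
--
-- def canDivideIntoSubsequences(nums: List[int], k: int) -> bool:
--     n = len(nums)
--     if n < k:
--         return False
--     best = 0
--     cur = 0
--     prev = None
--     for v in sorted(nums):
--         cur = cur + 1 if v == prev else 1
--         if cur > best:
--             best = cur
--         prev = v
--     return best * k <= n
-- ===== Notes on version B (the rewrite author's own statement) =====
-- stated objective: alternative
-- what changed: Replaces the hash-map frequency count with early exit by a sort of the list and a single run-length scan over the sorted copy, tracking the longest run of equal values.
-- intended difference: On the empty list with k <= 0 (the only inputs where the loop never runs yet the n < k guard passes), A returns False because its float('-inf') sentinel survives the loop and the NaN/inf comparison accidentally fails, while B returns True (max run 0, 0*k <= 0), the vacuously correct answer. — e.g. on canDivideIntoSubsequences([], 0): A returns false, B returns true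
import Mathlib
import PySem

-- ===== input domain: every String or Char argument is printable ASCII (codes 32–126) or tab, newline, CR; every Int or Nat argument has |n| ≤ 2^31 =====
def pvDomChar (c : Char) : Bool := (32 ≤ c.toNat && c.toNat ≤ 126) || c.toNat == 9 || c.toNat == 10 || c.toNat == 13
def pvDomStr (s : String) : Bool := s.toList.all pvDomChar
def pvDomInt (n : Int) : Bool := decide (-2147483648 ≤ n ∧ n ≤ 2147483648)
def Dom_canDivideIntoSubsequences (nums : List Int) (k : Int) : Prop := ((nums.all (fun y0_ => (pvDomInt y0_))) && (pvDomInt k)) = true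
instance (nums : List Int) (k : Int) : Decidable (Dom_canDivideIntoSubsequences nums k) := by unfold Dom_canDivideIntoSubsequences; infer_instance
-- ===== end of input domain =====

-- B replaces A's hash-map frequency count by sort + a single run-length scan; equivalence
-- proved outside D_ (empty list with k ≤ 0), where A's float('-inf') sentinel yields an
-- accidental False and B returns True.

-- ===== PORT A =====
-- A's loop: freq_map update, running max (max_freq : Option Int, none = float('-inf')),
-- early return when max_freq * k > n.  'none' at the final comparison happens only when the
-- loop body never ran (nums = []); Python returns False there (NaN/inf comparison for k ≤ 0,
-- and for k > 0 the n < k guard fires first), so the none branch returns false.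
def goA (n k : Int) : List Int → PySem.Dict Int Int → Option Int → Bool
  | [], _, mf =>
      match mf with
      | none => false
      | some m => decide (m * k ≤ n)
  | num :: rest, fm, mf =>
      let c := fm.getD num 0 + 1
      let fm' := fm.insert num c
      let mf' : Int :=
        match mf with
        | none => c
        | some m => if m < c then c else m
      if mf' * k > n then false
      else goA n k rest fm' (some mf')

def canDivideIntoSubsequences (nums : List Int) (k : Int) : Bool :=
  let n : Int := nums.length
  if n < k then false
  else goA n k nums PySem.Dict.empty none

-- ===== PORT B =====
-- B's loop over sorted(nums): run length of equal consecutive values, max run in best.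
def goB : List Int → Option Int → Int → Int → Int
  | [], _, _, best => best
  | v :: rest, prev, cur, best =>
      let cur' := if some v = prev then cur + 1 else 1
      let best' := if cur' > best then cur' else best
      goB rest (some v) cur' best'

def canDivideIntoSubsequences_alt (nums : List Int) (k : Int) : Bool :=
  let n : Int := nums.length
  if n < k then false
  else
    let best := goB (PySem.List.sorted nums (fun x => x) false) none 0 0
    decide (best * k ≤ n)

-- ===== PRECONDITION & SPEC =====
-- On the empty list with k ≤ 0 A returns False (its float('-inf') sentinel survives the empty
-- loop and the NaN/inf comparison accidentally fails) while B returns True (max run 0,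
-- 0*k ≤ 0), the vacuously correct answer.
def D_canDivideIntoSubsequences (nums : List Int) (k : Int) : Prop := nums = [] ∧ k ≤ 0
instance (nums : List Int) (k : Int) : Decidable (D_canDivideIntoSubsequences nums k) := by
  unfold D_canDivideIntoSubsequences; infer_instance

def Spec_canDivideIntoSubsequences (nums : List Int) (k : Int) (out : Bool) : Prop :=
  ¬ D_canDivideIntoSubsequences nums k → out = canDivideIntoSubsequences_alt nums k
instance (nums : List Int) (k : Int) (out : Bool) : Decidable (Spec_canDivideIntoSubsequences nums k out) := by
  unfold Spec_canDivideIntoSubsequences; infer_instance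

def pvDiffWitness_canDivideIntoSubsequences : List Int × Int := ([], 0)
def pvDiffWitnessOut_canDivideIntoSubsequences : Bool × Bool := (false, true)

-- ===== CLAIM (what is proved, stated in full; the proofs are below) =====
def Claim_unchanged_canDivideIntoSubsequences : Prop := ∀ (nums : List Int) (k : Int), Dom_canDivideIntoSubsequences nums k → Spec_canDivideIntoSubsequences nums k (canDivideIntoSubsequences nums k)
def Claim_changed_canDivideIntoSubsequences : Prop := Dom_canDivideIntoSubsequences (pvDiffWitness_canDivideIntoSubsequences.1) (pvDiffWitness_canDivideIntoSubsequences.2) ∧ D_canDivideIntoSubsequences (pvDiffWitness_canDivideIntoSubsequences.1) (pvDiffWitness_canDivideIntoSubsequences.2) ∧ canDivideIntoSubsequences (pvDiffWitness_canDivideIntoSubsequences.1) (pvDiffWitness_canDivideIntoSubsequences.2) = pvDiffWitnessOut_canDivideIntoSubsequences.1 ∧ canDivideIntoSubsequences_alt (pvDiffWitness_canDivideIntoSubsequences.1) (pvDiffWitness_canDivideIntoSubsequences.2) = pvDiffWitnessOut_canDivideIntoSubsequences.2 ∧ pvDiffWitnessOut_canDivideIntoSubsequences.1 ≠ pvDi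ffWitnessOut_canDivideIntoSubsequences.2
def Claim_exact_canDivideIntoSubsequences : Prop := ∀ (nums : List Int) (k : Int), Dom_canDivideIntoSubsequences nums k → D_canDivideIntoSubsequences nums k → canDivideIntoSubsequences nums k ≠ canDivideIntoSubsequences_alt nums k

-- ===== LEMMAS AND PROOFS =====

-- counts after one freq_map insertion, as a function of the key
lemma getD_insert_add (fm : PySem.Dict Int Int) (x y : Int) :
    (fm.insert x (fm.getD x 0 + 1)).getD y 0 = fm.getD y 0 + (if y = x then 1 else 0) := by
  rw [PySem.Dict.getD_insert]
  split_ifs with h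
  · simp [h]
  · simp

-- A's loop always returns true when k ≤ 0 (the early exit can never fire)
lemma goA_nonpos {n k : Int} (hk : k ≤ 0) (hn : 0 ≤ n) :
    ∀ (l : List Int) (fm : PySem.Dict Int Int) (mf : Option Int),
      (∀ y, 0 ≤ fm.getD y 0) → (∀ m, mf = some m → 0 ≤ m) → (mf = none → l ≠ []) →
      goA n k l fm mf = true := by
  intro l
  induction l with
  | nil =>
      intro fm mf _ hm h0
      cases mf with
      | none => exact absurd rfl (fun h => (h0 h) rfl)
      | some m =>
          simp only [goA, decide_eq_true_eq]
          have : m * k ≤ 0 := mul_nonpos_of_nonneg_of_nonpos (hm m rfl) hk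
          omega
  | cons x r ih =>
      intro fm mf hfm hm _
      simp only [goA]
      have hc : (0:Int) ≤ fm.getD x 0 + 1 := by have := hfm x; omega
      have hmf' : ∀ (mf' : Int), 0 ≤ mf' → (if mf' * k > n then false
          else goA n k r (fm.insert x (fm.getD x 0 + 1)) (some mf')) = true := by
        intro mf' hmf'
        have hle : mf' * k ≤ 0 := mul_nonpos_of_nonneg_of_nonpos hmf' hk
        rw [if_neg (by omega)]
        apply ih
        · intro y; rw [getD_insert_add]; have := hfm y; split_ifs <;> omega
        · intro m hm'; injection hm' with hm'; omega
        · intro h; exact absurd h (by simp)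
      cases mf with
      | none => exact hmf' _ hc
      | some m =>
          have h0m : 0 ≤ m := hm m rfl
          by_cases h : m < fm.getD x 0 + 1 <;> simp only [h, if_true, if_false] <;>
            [exact hmf' _ hc; exact hmf' _ h0m]

-- one step of A's loop, generalized over the new running max mf' and the incoming
-- max condition P
lemma goA_step {n k : Int} (hk : (1:Int) ≤ k) (x : Int) (r : List Int)
    (fm : PySem.Dict Int Int) (mf' : Int) (P : Prop) [Decidable P]
    (hge_c : fm.getD x 0 + 1 ≤ mf')
    (hPle : P → mf' = fm.getD x 0 + 1 ∨ mf' * k ≤ n)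
    (hlePn : mf' * k ≤ n → P)
    (hrec : goA n k r (fm.insert x (fm.getD x 0 + 1)) (some mf') =
      decide (mf' * k ≤ n ∧
        ∀ y ∈ r, ((fm.insert x (fm.getD x 0 + 1)).getD y 0 + (r.count y : Int)) * k ≤ n)) :
    (if mf' * k > n then false else goA n k r (fm.insert x (fm.getD x 0 + 1)) (some mf')) =
      decide (P ∧ ∀ y ∈ x :: r, (fm.getD y 0 + ((x :: r).count y : Int)) * k ≤ n) := by
  have hk0 : (0:Int) ≤ k := by omega
  have hgetD := getD_insert_add fm x
  -- the per-key terms coincide between the updated map over r and the original map over x :: r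
  have hterm : ∀ y ∈ r,
      (fm.insert x (fm.getD x 0 + 1)).getD y 0 + (r.count y : Int) =
      fm.getD y 0 + ((x :: r).count y : Int) := by
    intro y _
    rw [hgetD y]
    by_cases h : y = x
    · subst h; rw [List.count_cons_self]; push_cast; omega
    · rw [List.count_cons_of_ne (Ne.symm h)]; simp [h]
  have hxterm : fm.getD x 0 + ((x :: r).count x : Int) = fm.getD x 0 + 1 + (r.count x : Int) := by
    rw [List.count_cons_self]; push_cast; ring
  by_cases hexit : mf' * k > n
  · rw [if_pos hexit]
    symm; simp only [decide_eq_false_iff_not]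
    rintro ⟨hp, h2⟩
    rcases hPle hp with hc | hle
    · have hx := h2 x (by simp)
      rw [hxterm] at hx
      have : mf' * k ≤ (fm.getD x 0 + 1 + (r.count x : Int)) * k := by
        rw [hc]
        exact mul_le_mul_of_nonneg_right (le_add_of_nonneg_right (by positivity)) hk0
      omega
    · omega
  · rw [if_neg hexit]
    push_neg at hexit
    rw [hrec]
    simp only [decide_eq_decide]
    constructor
    · rintro ⟨-, h2⟩
      refine ⟨hlePn hexit, ?_⟩
      intro y hy
      rcases List.mem_cons.mp hy with rfl | hyr
      · by_cases hxr : y ∈ r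
        · rw [← hterm y hxr]; exact h2 y hxr
        · have h0 : r.count y = 0 := List.count_eq_zero.mpr hxr
          rw [hxterm, h0]
          push_cast
          calc (fm.getD y 0 + 1 + 0) * k = (fm.getD y 0 + 1) * k := by ring
            _ ≤ mf' * k := mul_le_mul_of_nonneg_right hge_c hk0
            _ ≤ n := hexit
      · rw [← hterm y hyr]; exact h2 y hyr
    · rintro ⟨-, h2⟩
      refine ⟨hexit, ?_⟩
      intro y hy
      rw [hterm y hy]
      exact h2 y (List.mem_cons_of_mem x hy)

-- characterization of A's loop for k ≥ 1: the running max with early exit computes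
-- "every total frequency times k stays ≤ n (and the incoming max does too)"
lemma goA_char {n k : Int} (hk : (1:Int) ≤ k) :
    ∀ (l : List Int) (fm : PySem.Dict Int Int) (mf : Option Int),
      (mf = none → l ≠ []) →
      goA n k l fm mf =
        decide ((∀ m, mf = some m → m * k ≤ n) ∧
                ∀ x ∈ l, (fm.getD x 0 + (l.count x : Int)) * k ≤ n) := by
  intro l
  induction l with
  | nil =>
      intro fm mf h0
      cases mf with
      | none => exact absurd rfl (fun h => (h0 h) rfl)
      | some m => simp [goA]
  | cons x r ih =>
      intro fm mf _
      have hrec : ∀ mf' : Int,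
          goA n k r (fm.insert x (fm.getD x 0 + 1)) (some mf') =
          decide (mf' * k ≤ n ∧
            ∀ y ∈ r, ((fm.insert x (fm.getD x 0 + 1)).getD y 0 + (r.count y : Int)) * k ≤ n) := by
        intro mf'
        rw [ih (fm.insert x (fm.getD x 0 + 1)) (some mf') (by simp)]
        simp
      cases mf with
      | none =>
          show (if (fm.getD x 0 + 1) * k > n then false
              else goA n k r (fm.insert x (fm.getD x 0 + 1)) (some (fm.getD x 0 + 1))) = _
          rw [goA_step hk x r fm (fm.getD x 0 + 1) True le_rfl
              (fun _ => Or.inl rfl) (fun _ => trivial) (hrec _)]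
          simp
      | some m =>
          show (if (if m < fm.getD x 0 + 1 then fm.getD x 0 + 1 else m) * k > n then false
              else goA n k r (fm.insert x (fm.getD x 0 + 1))
                (some (if m < fm.getD x 0 + 1 then fm.getD x 0 + 1 else m))) = _
          set mf' : Int := if m < fm.getD x 0 + 1 then fm.getD x 0 + 1 else m with hmf'
          have hge : fm.getD x 0 + 1 ≤ mf' := by rw [hmf']; split_ifs <;> omega
          have hgem : m ≤ mf' := by rw [hmf']; split_ifs <;> omega
          have hk0 : (0:Int) ≤ k := by omega
          rw [goA_step hk x r fm mf' (m * k ≤ n) hge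
              (fun hp => by
                by_cases h : m < fm.getD x 0 + 1
                · exact Or.inl (by rw [hmf', if_pos h])
                · exact Or.inr (by simpa [hmf', h] using hp))
              (fun hle => le_trans (mul_le_mul_of_nonneg_right hgem hk0) hle)
              (hrec _)]
          simp only [decide_eq_decide]
          constructor
          · rintro ⟨h1, h2⟩; exact ⟨fun m' hm' => by injection hm' with hm'; subst hm'; exact h1, h2⟩
          · rintro ⟨h1, h2⟩; exact ⟨h1 m rfl, h2⟩

-- B's loop result never drops below the incoming best
lemma goB_ge_best : ∀ (s : List Int) (p : Option Int) (c b : Int), b ≤ goB s p c b := by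
  intro s
  induction s with
  | nil => intro p c b; simp [goB]
  | cons v rest ih =>
      intro p c b
      simp only [goB]
      refine le_trans ?_ (ih (some v) _ _)
      split_ifs with h <;> omega

-- lower bounds: on a sorted tail all of whose elements are ≥ p, the result dominates
-- c + (count of p) and the count of every other element
lemma goB_lower : ∀ (s : List Int), s.Pairwise (· ≤ ·) → ∀ (p c b : Int),
    (∀ y ∈ s, p ≤ y) → c ≤ b →
    ((s.count p : Int) + c ≤ goB s (some p) c b) ∧
    (∀ x ∈ s, x ≠ p → (s.count x : Int) ≤ goB s (some p) c b) := by
  intro s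
  induction s with
  | nil => intro _ p c b _ hcb; simp [goB]; omega
  | cons v rest ih =>
      intro hpw p c b hge hcb
      have hpw' := (List.pairwise_cons.mp hpw).2
      have hvrest := (List.pairwise_cons.mp hpw).1
      simp only [goB]
      by_cases hvp : v = p
      · subst hvp
        rw [if_pos rfl]
        have hcb' : c + 1 ≤ (if c + 1 > b then c + 1 else b) := by split_ifs <;> omega
        have hrec := ih hpw' v (c + 1) _ hvrest hcb'
        constructor
        · rw [List.count_cons_self]; push_cast
          have := hrec.1; omega
        · intro x hx hxv
          rcases List.mem_cons.mp hx with rfl | hxr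
          · exact absurd rfl hxv
          · rw [List.count_cons_of_ne (Ne.symm hxv)]
            exact hrec.2 x hxr hxv
      · rw [if_neg (show ¬ some v = some p by simp [hvp])]
        have hb1 : (1:Int) ≤ (if (1:Int) > b then 1 else b) := by split_ifs <;> omega
        have hrec := ih hpw' v 1 _ hvrest hb1
        have hpnot : p ∉ rest := fun hp =>
          hvp (le_antisymm (hvrest p hp) (hge v (by simp)))
        have hgb : b ≤ goB rest (some v) 1 (if (1:Int) > b then 1 else b) := by
          refine le_trans ?_ (goB_ge_best rest (some v) 1 _)
          split_ifs <;> omega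
        constructor
        · rw [List.count_cons_of_ne hvp, List.count_eq_zero.mpr hpnot]
          push_cast; omega
        · intro x hx _
          rcases List.mem_cons.mp hx with rfl | hxr
          · rw [List.count_cons_self]; push_cast
            have := hrec.1; omega
          · by_cases hxv : x = v
            · subst hxv
              rw [List.count_cons_self]; push_cast
              have := hrec.1; omega
            · rw [List.count_cons_of_ne (Ne.symm hxv)]
              exact hrec.2 x hxr hxv

-- upper bound: the result is the incoming best, the completed run through p, or the
-- count of some later element
lemma goB_upper : ∀ (s : List Int), s.Pairwise (· ≤ ·) → ∀ (p c b : Int),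
    (∀ y ∈ s, p ≤ y) → c ≤ b →
    goB s (some p) c b = b ∨ goB s (some p) c b = c + (s.count p : Int) ∨
    ∃ x ∈ s, x ≠ p ∧ goB s (some p) c b = (s.count x : Int) := by
  intro s
  induction s with
  | nil => intro _ p c b _ _; left; simp [goB]
  | cons v rest ih =>
      intro hpw p c b hge hcb
      have hpw' := (List.pairwise_cons.mp hpw).2
      have hvrest := (List.pairwise_cons.mp hpw).1
      simp only [goB]
      by_cases hvp : v = p
      · subst hvp
        rw [if_pos rfl]
        have hcb' : c + 1 ≤ (if c + 1 > b then c + 1 else b) := by split_ifs <;> omega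
        have hlow := (goB_lower rest hpw' v (c + 1) _ hvrest hcb').1
        rcases ih hpw' v (c + 1) _ hvrest hcb' with h | h | ⟨x, hx, hxv, h⟩
        · -- the result is the updated best; if that is c + 1, the run must end here
          by_cases hcase : c + 1 > b
          · right; left
            rw [if_pos hcase] at hlow h ⊢
            rw [h] at hlow ⊢
            rw [List.count_cons_self]; push_cast; omega
          · left
            rw [if_neg hcase] at h ⊢
            exact h
        · right; left
          rw [h, List.count_cons_self]; push_cast; ring
        · right; right
          refine ⟨x, List.mem_cons_of_mem v hx, hxv, ?_⟩
          rw [h, List.count_cons_of_ne (Ne.symm hxv)]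
      · rw [if_neg (show ¬ some v = some p by simp [hvp])]
        have hb1 : (1:Int) ≤ (if (1:Int) > b then 1 else b) := by split_ifs <;> omega
        have hpnot : p ∉ rest := fun hp =>
          hvp (le_antisymm (hvrest p hp) (hge v (by simp)))
        have hlow := (goB_lower rest hpw' v 1 _ hvrest hb1).1
        rcases ih hpw' v 1 _ hvrest hb1 with h | h | ⟨x, hx, hxv, h⟩
        · by_cases hcase : (1:Int) > b
          · right; right
            refine ⟨v, by simp, hvp, ?_⟩
            rw [if_pos hcase] at hlow h ⊢
            rw [h] at hlow ⊢
            rw [List.count_cons_self]; push_cast; omega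
          · left
            rw [if_neg hcase] at h ⊢
            exact h
        · right; right
          refine ⟨v, by simp, hvp, ?_⟩
          rw [h, List.count_cons_self]; push_cast; ring
        · right; right
          have hxp : x ≠ p := fun hxp => hpnot (hxp ▸ hx)
          refine ⟨x, List.mem_cons_of_mem v hx, hxp, ?_⟩
          rw [h, List.count_cons_of_ne (Ne.symm hxv)]

-- B's result ≥ 1 on a nonempty list (used in the k ≤ 0 case)
lemma goB_pos (v : Int) (t : List Int) : (1:Int) ≤ goB (v :: t) none 0 0 := by
  simp only [goB, reduceCtorEq, if_false]
  norm_num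
  exact le_trans (by norm_num) (goB_ge_best t (some v) 1 1)

-- main equivalence on nonempty lists
lemma main_nonempty (nums : List Int) (k : Int) (hne : nums ≠ []) :
    canDivideIntoSubsequences nums k = canDivideIntoSubsequences_alt nums k := by
  unfold canDivideIntoSubsequences canDivideIntoSubsequences_alt
  set n : Int := (nums.length : Int) with hn
  have hn0 : 0 < n := by
    have := List.length_pos_iff.mpr hne
    omega
  by_cases hguard : n < k
  · simp [hguard]
  · rw [if_neg hguard, if_neg hguard]
    set s := PySem.List.sorted nums (fun x => x) false with hs
    have hperm : s.Perm nums := PySem.List.sorted_perm nums (fun x => x) false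
    have hsne : s ≠ [] := by
      intro h
      exact hne ((h ▸ hperm).symm.eq_nil)
    obtain ⟨v, t, hvt⟩ := List.exists_cons_of_ne_nil hsne
    have hpw : s.Pairwise (· ≤ ·) := by
      have := PySem.List.sorted_pairwise nums (fun x => x)
      simpa using this
    have hcount : ∀ x, s.count x = nums.count x := fun x => hperm.count_eq x
    have hmem : ∀ x, x ∈ s ↔ x ∈ nums := fun x => hperm.mem_iff
    rcases le_or_gt k 0 with hk | hk
    · -- k ≤ 0: both sides are true
      rw [goA_nonpos hk (by omega) nums PySem.Dict.empty none
          (by intro y; simp [PySem.Dict.getD_empty]) (by simp) (fun _ => hne)]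
      have hB : (1:Int) ≤ goB s none 0 0 := hvt ▸ goB_pos v t
      have : goB s none 0 0 * k ≤ 0 := mul_nonpos_of_nonneg_of_nonpos (by omega) hk
      symm; simp only [decide_eq_true_eq]; omega
    · -- k ≥ 1
      have hk1 : (1:Int) ≤ k := hk
      have hk0 : (0:Int) ≤ k := by omega
      have hkn : k ≤ n := by omega
      rw [goA_char hk1 nums PySem.Dict.empty none (fun _ => hne)]
      have hA : (∀ m, (none : Option Int) = some m → m * k ≤ n) := by simp
      -- unfold one step of B's loop
      rw [hvt]
      simp only [goB, reduceCtorEq, if_false, gt_iff_lt, show (1:Int) > 0 by norm_num, if_true]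
      have hpwt : t.Pairwise (· ≤ ·) := (List.pairwise_cons.mp (hvt ▸ hpw)).2
      have hvt_ge : ∀ y ∈ t, v ≤ y := (List.pairwise_cons.mp (hvt ▸ hpw)).1
      have hlow := goB_lower t hpwt v 1 1 hvt_ge (le_refl 1)
      have hup := goB_upper t hpwt v 1 1 hvt_ge (le_refl 1)
      set best := goB t (some v) 1 1 with hbest
      simp only [decide_eq_decide]
      constructor
      · rintro ⟨-, h2⟩
        -- every count * k ≤ n, hence best * k ≤ n via the upper bound
        have hcnt : ∀ x ∈ nums, (nums.count x : Int) * k ≤ n := by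
          intro x hx
          have := h2 x hx
          simpa [PySem.Dict.getD_empty] using this
        rcases hup with h | h | ⟨x, hx, hxv, h⟩
        · rw [h]; omega
        · rw [h]
          have hvmem : v ∈ nums := (hmem v).mp (hvt ▸ by simp)
          have heq : (1:Int) + (t.count v : Int) = (nums.count v : Int) := by
            rw [← hcount v, hvt, List.count_cons_self]; push_cast; ring
          rw [heq]
          exact hcnt v hvmem
        · rw [h]
          have hxmem : x ∈ nums := (hmem x).mp (hvt ▸ List.mem_cons_of_mem v hx)
          have heq : ((t.count x : Nat) : Int) = (nums.count x : Int) := by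
            rw [← hcount x, hvt, List.count_cons_of_ne (Ne.symm hxv)]
          rw [heq]
          exact hcnt x hxmem
      · intro hB
        refine ⟨hA, ?_⟩
        intro x hx
        rw [PySem.Dict.getD_empty]
        have hxs : x ∈ s := (hmem x).mpr hx
        have hxbest : (nums.count x : Int) ≤ best := by
          rw [← hcount x, hvt]
          rcases List.mem_cons.mp (hvt ▸ hxs) with rfl | hxt
          · rw [List.count_cons_self]; push_cast; have := hlow.1; omega
          · by_cases hxv : x = v
            · subst hxv
              rw [List.count_cons_self]; push_cast; have := hlow.1; omega
            · rw [List.count_cons_of_ne (Ne.symm hxv)]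
              exact hlow.2 x hxt hxv
        calc (0 + (nums.count x : Int)) * k = (nums.count x : Int) * k := by ring
          _ ≤ best * k := mul_le_mul_of_nonneg_right hxbest hk0
          _ ≤ n := hB

-- ===== VERDICT (by name: the statement is the Claim_ definition above) =====
theorem canDivideIntoSubsequences_spec : Claim_unchanged_canDivideIntoSubsequences := by
  intro nums k _ hD
  rcases eq_or_ne nums [] with rfl | hne
  · -- empty list: outside D_ means 0 < k, both guards fire
    have hk : 0 < k := by
      by_contra h
      exact hD ⟨rfl, by omega⟩
    simp [canDivideIntoSubsequences, canDivideIntoSubsequences_alt, hk]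
  · exact main_nonempty nums k hne

theorem canDivideIntoSubsequences_changed : Claim_changed_canDivideIntoSubsequences := by
  unfold Claim_changed_canDivideIntoSubsequences; decide

theorem canDivideIntoSubsequences_tight : Claim_exact_canDivideIntoSubsequences := by
  intro nums k _ hD
  obtain ⟨rfl, hk⟩ := hD
  have h1 : canDivideIntoSubsequences [] k = false := by
    rw [show canDivideIntoSubsequences [] k = if (0:Int) < k then false else false from rfl]
    split_ifs <;> rfl
  have h2 : canDivideIntoSubsequences_alt [] k = true := by
    rw [show canDivideIntoSubsequences_alt [] k
        = if (0:Int) < k then false else decide ((0:Int) * k ≤ (0:Int)) from rfl]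
    rw [if_neg (by omega)]
    norm_num
  rw [h1, h2]
  simp
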